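-- pv_equiv track=rewrite | github.com/rossi-jeff/python-games-fastapi | utilities/ten_grand.py | ScoreThreeKind
-- ===== SOURCE A (Python) =====
-- from typing import List
--
-- def MapDieFaces(dice: List[int]):
--     dieMap = {}
--     for d in dice:
--         if not d in dieMap:
--             dieMap[d] = 0
--         dieMap[d] = dieMap[d] + 1
--     keys: List[int] = []
--     for k in dieMap.keys():
--         keys.append(k)
--     values: List[int] = []
--     for v in dieMap.values():
--         values.append(v)
--     return dieMap, keys, values
--
-- def ScoreThreeKind(dice: List[int]):
--     score = 0
--     dieMap, keys, _ = MapDieFaces(dice)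
--     for k in keys:
--         if dieMap[k] == 3:
--             if k == 1:
--                 score = score + 1000
--             else:
--                 score = score + (k * 100)
--     return score
-- ===== SOURCE B (Python) =====
-- def ScoreThreeKind(dice):
--     score = 0
--     run_val = None
--     run_len = 0
--     for d in sorted(dice):
--         if d == run_val:
--             run_len += 1
--         else:
--             if run_len == 3:
--                 score += 1000 if run_val == 1 else run_val * 100
--             run_val = d
--             run_len = 1
--     if run_len == 3:
--         score += 1000 if run_val == 1 else run_val * 100
--     return score
-- ===== Notes on version B (the rewrite author's own statement) =====
-- stated objective: alternative
-- what changed: Replaces the dict-counting pass plus key iteration with a sort of a copy of the dice followed by a single run-length scan that scores each maximal run of length exactly 3.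
import Mathlib
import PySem

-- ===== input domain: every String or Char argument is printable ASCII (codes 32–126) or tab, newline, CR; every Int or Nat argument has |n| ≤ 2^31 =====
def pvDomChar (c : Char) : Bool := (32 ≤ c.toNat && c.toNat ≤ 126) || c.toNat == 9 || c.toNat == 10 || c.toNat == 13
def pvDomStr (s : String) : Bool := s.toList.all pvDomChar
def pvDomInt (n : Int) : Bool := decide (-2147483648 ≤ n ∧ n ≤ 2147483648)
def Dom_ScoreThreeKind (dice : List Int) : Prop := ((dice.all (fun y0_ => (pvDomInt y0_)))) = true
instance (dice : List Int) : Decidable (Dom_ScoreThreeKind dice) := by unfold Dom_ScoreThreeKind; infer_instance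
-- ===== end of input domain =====

-- B replaces A's dict-counting pass with a sort of a copy of the dice and one run-length
-- scan scoring each maximal run of length exactly 3 (objective: alternative decomposition).

-- ===== PORT A =====
def MapDieFaces (dice : List Int) : PySem.Dict Int Int × List Int × List Int :=
  let dieMap := dice.foldl (fun m d =>
      let m := if !(m.contains d) then m.insert d 0 else m
      m.insert d (m.getD d 0 + 1)) PySem.Dict.empty
  let keys := (dieMap.keys).foldl (fun acc k => acc ++ [k]) []
  let values := (dieMap.values).foldl (fun acc v => acc ++ [v]) []
  (dieMap, keys, values)

def ScoreThreeKind (dice : List Int) : Int :=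
  let r := MapDieFaces dice
  let dieMap := r.1
  let keys := r.2.1
  keys.foldl (fun score k =>
    if dieMap.getD k 0 = 3 then
      if k = 1 then score + 1000 else score + k * 100
    else score) 0

-- ===== PORT B =====
-- payout of a finished run; `none` is unreachable in B (run_len = 3 never holds with run_val = None)
def pvPayout (runVal : Option Int) : Int :=
  match runVal with
  | some v => if v = 1 then 1000 else v * 100
  | none => 0

-- loop body of B: state (score, run_val, run_len); `d == run_val` is False against None
def pvStepB (st : Int × Option Int × Int) (d : Int) : Int × Option Int × Int :=
  if st.2.1 = some d then (st.1, st.2.1, st.2.2 + 1)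
  else ((if st.2.2 = 3 then st.1 + pvPayout st.2.1 else st.1), some d, 1)

def ScoreThreeKind_alt (dice : List Int) : Int :=
  let st := (PySem.List.sorted dice (fun x => x) false).foldl pvStepB ((0 : Int), (none : Option Int), (0 : Int))
  if st.2.2 = 3 then st.1 + pvPayout st.2.1 else st.1

-- ===== PRECONDITION & SPEC =====
def Spec_ScoreThreeKind (dice : List Int) (out : Int) : Prop := out = ScoreThreeKind_alt dice
instance (dice : List Int) (out : Int) : Decidable (Spec_ScoreThreeKind dice out) := by unfold Spec_ScoreThreeKind; infer_instance

-- ===== CLAIM (what is proved, stated in full; the proofs are below) =====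
def Claim_equal_ScoreThreeKind : Prop := ∀ (dice : List Int), Dom_ScoreThreeKind dice → Spec_ScoreThreeKind dice (ScoreThreeKind dice)

-- ===== LEMMAS AND PROOFS =====

-- the per-face contribution of face k, with counts taken in `src`
def pvH (src : List Int) (k : Int) : Int :=
  if (src.count k : Int) = 3 then (if k = 1 then 1000 else k * 100) else 0

-- B's trailing flush after the loop
def pvFinish (st : Int × Option Int × Int) : Int :=
  if st.2.2 = 3 then st.1 + pvPayout st.2.1 else st.1

-- B's whole computation on an (already sorted) list
def pvT (m : List Int) : Int :=
  pvFinish (m.foldl pvStepB ((0 : Int), (none : Option Int), (0 : Int)))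

-- A's dict-building step is exactly "insert with incremented count"
lemma pvStepA_eq (m : PySem.Dict Int Int) (d : Int) :
    (let m' := if !(m.contains d) then m.insert d 0 else m
     m'.insert d (m'.getD d 0 + 1)) = m.insert d (m.getD d 0 + 1) := by
  cases h : m.contains d
  · simp [PySem.Dict.getD_insert_self, PySem.Dict.insert_insert_self,
      PySem.Dict.getD_of_not_contains m 0 h]
  · simp

lemma pvMapDieFaces_eq (dice : List Int) :
    MapDieFaces dice =
      (PySem.Dict.counter dice, (PySem.Dict.counter dice).keys, (PySem.Dict.counter dice).values) := by
  unfold MapDieFaces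
  simp only [pvStepA_eq, PySem.Dict.foldl_insert_getD_add_one_eq_counter,
    PySem.List.foldl_append_singleton, List.nil_append]

-- A's accumulation step, written as "add the contribution"
lemma pvStepScore_eq (src : List Int) :
    (fun (score k : Int) =>
      if (src.count k : Int) = 3 then
        if k = 1 then score + 1000 else score + k * 100
      else score) = fun score k => score + pvH src k := by
  funext s k
  unfold pvH
  split_ifs <;> ring

lemma pvA_eq_sum (dice : List Int) :
    ScoreThreeKind dice = ∑ k ∈ dice.toFinset, pvH dice k := by
  unfold ScoreThreeKind
  rw [pvMapDieFaces_eq]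
  simp only [PySem.Dict.getD_counter, pvStepScore_eq, PySem.List.foldl_add, zero_add]
  have hnd := PySem.Dict.nodup_keys_counter dice
  rw [← List.sum_toFinset (pvH dice) hnd]
  have hset : ((PySem.Dict.counter dice).keys).toFinset = dice.toFinset := by
    ext a
    simp [PySem.Dict.keys_counter, PySem.Set.mem_ofList]
  rw [hset]

-- loop invariant of B's scan: an open run (value v, length k) plus a sorted tail all ≥ v
lemma pvB_loop (l : List Int) (hl : l.Pairwise (· ≤ ·)) :
    ∀ (s v k : Int), (∀ x ∈ l, v ≤ x) →
      pvFinish (l.foldl pvStepB (s, some v, k)) =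
        s + (if k + (l.count v : Int) = 3 then (if v = 1 then 1000 else v * 100) else 0)
          + pvT (l.filter (· ≠ v)) := by
  induction l with
  | nil =>
    intro s v k _
    simp only [List.foldl_nil, List.count_nil, List.filter_nil, pvFinish, pvT, pvPayout]
    norm_num
    split_ifs <;> simp
  | cons d t ih =>
    intro s v k hall
    have hpt : t.Pairwise (· ≤ ·) := hl.of_cons
    have htail : ∀ x ∈ t, d ≤ x := fun x hx => (List.pairwise_cons.mp hl).1 x hx
    by_cases hdv : d = v
    · subst hdv
      have hstep : pvStepB (s, some d, k) d = (s, some d, k + 1) := by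
        simp [pvStepB]
      rw [List.foldl_cons, hstep, ih hpt s d (k + 1) htail]
      have hc : (k + 1) + (t.count d : Int) = k + ((d :: t).count d : Int) := by
        rw [List.count_cons_self]; push_cast; ring
      rw [hc, List.filter_cons_of_neg (by simp)]
    · have hvd : v < d := lt_of_le_of_ne (hall d (by simp)) (fun h => hdv h.symm)
      have hvd' : v ≠ d := fun h => hdv h.symm
      have hstep : pvStepB (s, some v, k) d =
          ((if k = 3 then s + pvPayout (some v) else s), some d, 1) := by
        simp [pvStepB, hvd']
      have hvnott : ∀ x ∈ t, x ≠ v := fun x hx h => by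
        have := htail x hx; omega
      have hcnt : t.count v = 0 := List.count_eq_zero.mpr (fun h => hvnott v h rfl)
      have hfil : t.filter (· ≠ v) = t := List.filter_eq_self.mpr (by
        intro x hx; simpa using hvnott x hx)
      have hT : pvT (d :: t) =
          (if 1 + (t.count d : Int) = 3 then (if d = 1 then 1000 else d * 100) else 0)
            + pvT (t.filter (· ≠ d)) := by
        have h0 : pvStepB (0, none, 0) d = (0, some d, 1) := by simp [pvStepB]
        have e : pvT (d :: t) = pvFinish (t.foldl pvStepB (0, some d, 1)) := by
          unfold pvT; rw [List.foldl_cons, h0]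
        rw [e, ih hpt 0 d 1 htail]; ring
      rw [List.foldl_cons, hstep, ih hpt _ d 1 htail]
      have hfil2 : (d :: t).filter (· ≠ v) = d :: t := by
        rw [List.filter_cons_of_pos (by simp [hdv]), hfil]
      rw [hfil2, hT]
      have hc : ((d :: t).count v : Int) = 0 := by
        simp [hcnt, hdv]
      rw [hc]
      simp only [pvPayout, add_zero]
      split_ifs <;> ring

-- B on a sorted list computes the sum of contributions over the distinct faces
lemma pvT_eq_sum : ∀ (n : Nat) (m : List Int), m.length ≤ n → m.Pairwise (· ≤ ·) →
    pvT m = ∑ k ∈ m.toFinset, pvH m k := by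
  intro n
  induction n with
  | zero =>
    intro m hm _
    have : m = [] := List.eq_nil_of_length_eq_zero (Nat.le_zero.mp hm)
    subst this
    simp [pvT, pvFinish]
  | succ n ih =>
    intro m hm hpw
    match m with
    | [] => simp [pvT, pvFinish]
    | d :: t =>
      have hpt : t.Pairwise (· ≤ ·) := hpw.of_cons
      have htail : ∀ x ∈ t, d ≤ x := fun x hx => (List.pairwise_cons.mp hpw).1 x hx
      have hT : pvT (d :: t) =
          (if 1 + (t.count d : Int) = 3 then (if d = 1 then 1000 else d * 100) else 0)
            + pvT (t.filter (· ≠ d)) := by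
        have h0 : pvStepB (0, none, 0) d = (0, some d, 1) := by simp [pvStepB]
        have e : pvT (d :: t) = pvFinish (t.foldl pvStepB (0, some d, 1)) := by
          unfold pvT; rw [List.foldl_cons, h0]
        rw [e, pvB_loop t hpt 0 d 1 htail]; ring
      set m' := t.filter (· ≠ d) with hm'
      have hlen : m'.length ≤ n := by
        have h1 : m'.length ≤ t.length := List.length_filter_le _ _
        have h2 : t.length ≤ n := by simpa using Nat.lt_succ_iff.mp (Nat.lt_of_lt_of_le (by simp) hm)
        omega
      have hpw' : m'.Pairwise (· ≤ ·) := hpt.sublist List.filter_sublist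
      have hrec := ih m' hlen hpw'
      have hdne : d ∉ m' := by
        intro h
        have := List.of_mem_filter h
        simp at this
      have hins : (d :: t).toFinset = insert d m'.toFinset := by
        ext a
        by_cases had : a = d
        · simp [had]
        · simp [had, hm', List.mem_toFinset]
      have hcongr : ∑ k ∈ m'.toFinset, pvH m' k = ∑ k ∈ m'.toFinset, pvH (d :: t) k := by
        refine Finset.sum_congr rfl (fun k hk => ?_)
        have hkm : k ∈ m' := List.mem_toFinset.mp hk
        have hkd : k ≠ d := by
          have := List.of_mem_filter hkm
          simpa using this
        unfold pvH
        rw [hm', List.count_filter (by simpa using hkd)]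
        simp [Ne.symm hkd]
      have hhead : pvH (d :: t) d =
          (if 1 + (t.count d : Int) = 3 then (if d = 1 then 1000 else d * 100) else 0) := by
        unfold pvH
        rw [List.count_cons_self]
        have : ((t.count d + 1 : Nat) : Int) = 1 + (t.count d : Int) := by push_cast; ring
        rw [this]
      rw [hT, hrec, hcongr, hins, Finset.sum_insert (by simpa using hdne), hhead]

lemma pvB_eq_sum (dice : List Int) :
    ScoreThreeKind_alt dice = ∑ k ∈ dice.toFinset, pvH dice k := by
  have halt : ScoreThreeKind_alt dice = pvT (PySem.List.sorted dice (fun x => x) false) := rfl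
  set m := PySem.List.sorted dice (fun x => x) false with hm
  have hpw : m.Pairwise (· ≤ ·) := by
    have := PySem.List.sorted_pairwise dice (fun x => x)
    simpa using this
  have hperm : m.Perm dice := PySem.List.sorted_perm dice (fun x => x) false
  rw [halt, pvT_eq_sum m.length m le_rfl hpw, List.toFinset_eq_of_perm m dice hperm]
  refine Finset.sum_congr rfl (fun k _ => ?_)
  unfold pvH
  rw [hperm.count_eq]

-- ===== VERDICT (by name: the statement is the Claim_ definition above) =====
theorem ScoreThreeKind_spec : Claim_equal_ScoreThreeKind := by
  intro dice _
  unfold Spec_ScoreThreeKind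
  rw [pvA_eq_sum, pvB_eq_sum]
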